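/-
  INTERFACE CHECK for the clause `DeintApart.tableObj` of codebook_decode_deinterleave_repeat's precondition ("the table of output
  pointers `[outputs, outputs + 8·ch)` is disjoint from `*f`": the farm's CONTRACT-PRE problem of freeze-6, unit
  codebook_decode_deinterleave_repeat.2): the ONE caller, decode_residue (call sites 0x10f18e in segment .4, 0x10f538 in segment .6),
  gives it from the hypothesis `Entered u₀ g` that every segment statement of decode_residue has.

      at both call sites     rdi = `[rbp−0xb0]` = f                    (`DecodeResidue.Common.fr_f`)
                             rdx = `[rbp−0xd0]` = residue_buffers      (`DecodeResidue.Common.fr_rb`:  the word `g.e.reg .rsi`)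
                             ecx = `[rbp−0x94]` = ch                   (`DecodeResidue.Common.fr_ch`:  the number `g.ch`)
      residue_buffers        an array of the CALLER's stack frame: `Args.rb_stack` (at or above the caller's stack pointer, below 800000H)
      `*f`                   a setup block of the arena, off the stack region: `DecodeInv.objOff`

  Also: the clause is what segment .2 of the callee lacked — a qword of the table is not touched by a store inside `*f`.
-/
import Vorbis.Spec.DecodeResidue
import Vorbis.Spec.Codebook.Deint
namespace Vorbis.Spec.DeintTableTest
open X86 X86.User Asan Vorbis Vorbis.Spec Vorbis.Spec.DecodeResidue

/-- The clause in the ghost bundle's names: `Entered.deint_tableObj`. -/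
example {u₀ : State} {g : G} (he : Entered u₀ g) : (Block.mk g.rb (8 * g.ch)).disjoint (objBlock g.f) :=
  he.deint_tableObj

/-- The clause LITERALLY as `DeintPre.apart.tableObj` asks it of the state `s` at the `call` instruction, from the three argument
registers as the call sites load them: rdi = f, rdx = residue_buffers (both the entry's words), ecx = ch (zero-extended). -/
example {u₀ : State} {g : G} (he : Entered u₀ g) (s : State) (hdi : s.reg .rdi = g.e.reg .rdi) (hdx : s.reg .rdx = g.e.reg .rsi)
    (hcx : s.reg .rcx = UInt64.ofNat g.ch) :
    (Block.mk (s.reg .rdx).toNat (8 * argU32 (s.reg .rcx))).disjoint (objBlock (s.reg .rdi).toNat) := by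
  have hlt : g.ch < 2 ^ 32 := Nat.mod_lt _ (by decide)
  have hch : argU32 (s.reg .rcx) = g.ch := by
    rw [hcx]
    simp only [argU32, UInt64.toNat_ofNat']
    omega
  rw [hdi, hdx, hch]
  exact he.deint_tableObj

/-- What the clause is for (segment .2 of the callee): a pointer of the table reads the same after ANY change of memory inside
`*f` — e.g. the stores into `f->acc` / `f->valid_bits` and the footprint `bookWins f` of the three callees. -/
example {mem mem' : Mem} {f c outputs ch cp pp len : Nat} (h : DeintApart mem f c outputs ch cp pp len)
    (hs : Mem.SameExcept [⟨f, f + 1808⟩] mem mem') (k : Nat) (hk : k < ch) (hhi : outputs + 8 * ch < 2 ^ 64) :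
    mem'.readLE (UInt64.ofNat (outputs + 8 * k)) 8 = mem.readLE (UInt64.ofNat (outputs + 8 * k)) 8 := by
  have hd := h.tableObj
  simp only [vblock, Off.sizeof.stb_vorbis] at hd
  have ea : (UInt64.ofNat (outputs + 8 * k)).toNat = outputs + 8 * k := by
    rw [UInt64.toNat_ofNat']
    omega
  apply hs.readLE
  · rw [ea]
    omega
  · rw [ea]
    intro w hw
    simp only [List.mem_cons, List.not_mem_nil, or_false] at hw
    subst hw
    simp only []
    omega

end Vorbis.Spec.DeintTableTest
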